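-- pv_equiv track=rewrite | github.com/anu-coder/Intensive-python | exercises/min_of_pairs.py | min_of_pairs
-- ===== SOURCE A (Python) =====
-- def min_of_pairs(number):
--     """ Return a number built from the min of
--         each pair of the digits of the input number.
--
--     >>> min_of_pairs('84372216')
--     '4321'
--     """
--
--     min_vals = []
--     v1=v2=None
--     for i, s in enumerate(number):
--         v2 = v = int(s)
--         if ((i - 1) % 2 == 0) and i != 0: # Even place entry
--             min_vals.append(str(min(v1, v2)))
--             v1 = None
--         else:
--             v1 = v
--
--     res = ''.join(min_vals)
--     return(res)
-- ===== SOURCE B (Python) =====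
-- def min_of_pairs(number):
--     digits = [int(c) for c in number]                 # pass 1: convert every character
--     mins = map(min, digits[::2], digits[1::2])        # pass 2: strided halves, elementwise min
--     return ''.join(map(str, mins))                    # pass 3: stringify and join
-- ===== Notes on version B (the rewrite author's own statement) =====
-- stated objective: idiomatic
-- what changed: Replaces A's single-pass enumerate-with-parity-flag state machine (v1/v2 accumulator, per-step branch) by three staged passes: convert the whole string to an int list, combine the strided slices digits[::2] and digits[1::2] elementwise with map(min, ...), then stringify and join.
import Mathlib
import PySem

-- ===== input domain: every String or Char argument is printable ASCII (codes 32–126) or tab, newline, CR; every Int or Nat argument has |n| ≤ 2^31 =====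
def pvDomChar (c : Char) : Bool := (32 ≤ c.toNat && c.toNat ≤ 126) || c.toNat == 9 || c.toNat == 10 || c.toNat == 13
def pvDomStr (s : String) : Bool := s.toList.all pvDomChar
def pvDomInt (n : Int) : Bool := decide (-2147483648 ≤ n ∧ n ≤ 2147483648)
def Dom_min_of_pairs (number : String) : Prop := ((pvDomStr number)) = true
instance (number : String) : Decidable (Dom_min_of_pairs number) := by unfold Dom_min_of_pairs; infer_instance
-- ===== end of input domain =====

-- B replaces A's single-pass enumerate-with-parity-flag state machine (v1/v2 accumulator)
-- by three staged passes: convert the whole string to an int list, pair the strided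
-- slices digits[::2] / digits[1::2] elementwise with map(min, …), then stringify and join.

-- int(c) for a single character c: exact where Python's int succeeds (Pre_ admits only
-- digit characters); the .getD 0 default is only reached where Python raises ValueError.
def pyIntChar (c : Char) : Int := (PySem.Int.ofChars? [c]).getD 0

-- ===== PORT A =====
def min_of_pairs (number : String) : String :=
  -- state: (min_vals, v1, v2); v1 = None is Option.none.  min(v1, v2) with v1 = None
  -- would raise TypeError in Python but is unreachable (the append branch only fires at
  -- odd indices, right after the else branch set v1); .getD 0 stands for that dead case.
  let fin := (PySem.List.enumerate number.toList 0).foldl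
    (fun (st : List String × Option Int × Option Int) (p : Int × Char) =>
      let v := pyIntChar p.2
      if PySem.Int.mod (p.1 - 1) 2 == 0 && p.1 != 0 then
        (st.1 ++ [PySem.Int.toStr (min (st.2.1.getD 0) v)], (none, some v))
      else (st.1, (some v, some v)))
    ([], (none, none))
  PySem.Str.join "" fin.1

-- ===== PORT B =====
-- digits[::2] and digits[1::2] are PySem slices with step 2 (.getD [] is dead: step ≠ 0);
-- map(min, evens, odds) zips the two halves, stopping at the shorter one.
def min_of_pairs_alt (number : String) : String :=
  let digits := number.toList.map pyIntChar
  let evens := (PySem.List.slice? digits none none 2).getD []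
  let odds  := (PySem.List.slice? digits (some 1) none 2).getD []
  let mins := (evens.zip odds).map (fun p => min p.1 p.2)
  PySem.Str.join "" (mins.map PySem.Int.toStr)

-- ===== PRECONDITION & SPEC =====
-- A calls int(s) on every character, so it raises ValueError unless every character is a digit.
def Pre_min_of_pairs (number : String) : Prop := number.toList.all PySem.Chars.isdigit = true
instance (number : String) : Decidable (Pre_min_of_pairs number) := by unfold Pre_min_of_pairs; infer_instance
def pvWitness_min_of_pairs : String := "305"

def Spec_min_of_pairs (number : String) (out : String) : Prop := out = min_of_pairs_alt number
instance (number : String) (out : String) : Decidable (Spec_min_of_pairs number out) := by unfold Spec_min_of_pairs; infer_instance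

-- ===== CLAIM =====
def Claim_equal_min_of_pairs : Prop := ∀ (number : String), Dom_min_of_pairs number → Pre_min_of_pairs number → Spec_min_of_pairs number (min_of_pairs number)

-- ===== LEMMAS AND PROOFS =====

-- the disjoint consecutive pairs of a list (trailing unpaired element dropped)
def pvPairs {α : Type} : List α → List (α × α)
  | a :: b :: t => (a, b) :: pvPairs t
  | _ => []

-- the even-index elements of a list (what xs[::2] selects)
def pvEvens {α : Type} : List α → List α
  | a :: _ :: t => a :: pvEvens t
  | [a] => [a]
  | [] => []

-- A's loop, started at an even index with any v1/v2 state, appends exactly the per-pair strings.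
theorem pvLoop (l : List Char) : ∀ (i : Nat) (acc : List String) (v1 v2 : Option Int),
    ((PySem.List.enumerate l ((2 * i : Nat) : Int)).foldl
      (fun (st : List String × Option Int × Option Int) (p : Int × Char) =>
        let v := pyIntChar p.2
        if PySem.Int.mod (p.1 - 1) 2 == 0 && p.1 != 0 then
          (st.1 ++ [PySem.Int.toStr (min (st.2.1.getD 0) v)], (none, some v))
        else (st.1, (some v, some v)))
      (acc, (v1, v2))).1
    = acc ++ (pvPairs l).map (fun p => PySem.Int.toStr (min (pyIntChar p.1) (pyIntChar p.2))) := by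
  induction l using pvPairs.induct with
  | case1 a b t ih =>
    intro i acc v1 v2
    have h1 : (PySem.Int.mod (((2 * i : Nat) : Int) - 1) 2 == 0 && ((2 * i : Nat) : Int) != 0) = false := by
      simp
    have h2 : (PySem.Int.mod (((2 * i : Nat) : Int) + 1 - 1) 2 == 0 && (((2 * i : Nat) : Int) + 1) != 0) = true := by
      simp; omega
    have e : ((2 * i : Nat) : Int) + 1 + 1 = ((2 * (i + 1) : Nat) : Int) := by push_cast; ring
    simp only [PySem.List.enumerate_cons, List.foldl_cons, h1, h2, Bool.false_eq_true,
      if_false, if_true, e]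
    rw [ih (i + 1)]
    simp [pvPairs]
  | case2 l h =>
    intro i acc v1 v2
    cases l with
    | nil => simp [PySem.List.enumerate, pvPairs]
    | cons a t =>
      cases t with
      | nil =>
        simp [PySem.List.enumerate, pvPairs]
        rw [if_neg (by omega)]
      | cons b t' => exact absurd rfl (h a b t')

-- the strided selection as a filterMap over range (what slice? with step 2 computes)
theorem pvFmCore {α : Type} : ∀ (l : List α),
    List.filterMap (fun k : Nat => l[(2*(k:Int)).toNat]?) (List.range ((l.length+1)/2)) = pvEvens l := by
  intro l
  induction l using pvEvens.induct with
  | case1 a b t ih =>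
    have hc : ((a :: b :: t).length + 1)/2 = ((t.length + 1)/2) + 1 := by simp; omega
    rw [hc, List.range_succ_eq_map, List.filterMap_cons, List.filterMap_map]
    have hf : ((fun k : Nat => (a :: b :: t)[(2*(k:Int)).toNat]?) ∘ (fun k => k + 1))
        = fun k : Nat => t[(2*(k:Int)).toNat]? := by
      funext k
      have h2 : (2*((k:Int)+1)).toNat = (2*(k:Int)).toNat + 1 + 1 := by omega
      simp [Function.comp, h2]
    simp only [hf, ih]
    simp [pvEvens]
  | case2 a => simp [List.range_succ, pvEvens]
  | case3 => simp [pvEvens]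

theorem pvSliceEvens {α : Type} (l : List α) : PySem.List.slice? l none none 2 = some (pvEvens l) := by
  simp only [PySem.List.slice?, PySem.List.sliceIndices]
  norm_num
  have hif : (if 0 < l.length then (((l.length:Int) + 2 - 1) / 2).toNat else 0) = (l.length + 1)/2 := by
    split_ifs with h <;> omega
  rw [hif]
  exact pvFmCore l

theorem pvSliceOdds {α : Type} (l : List α) : PySem.List.slice? l (some 1) none 2 = some (pvEvens l.tail) := by
  cases l with
  | nil => simp [PySem.List.slice?, PySem.List.sliceIndices, pvEvens]
  | cons a m =>
    simp only [PySem.List.slice?, PySem.List.sliceIndices]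
    norm_num
    have hif : (if 0 < m.length then (((m.length:Int) + 2 - 1) / 2).toNat else 0) = (m.length + 1)/2 := by
      split_ifs with h <;> omega
    rw [hif]
    have hf : (fun k : Nat => (a :: m)[(1 + 2*(k:Int)).toNat]?) = fun k : Nat => m[(2*(k:Int)).toNat]? := by
      funext k
      have h2 : (1 + 2*(k:Int)).toNat = (2*(k:Int)).toNat + 1 := by omega
      simp [h2]
    rw [hf]
    exact pvFmCore m

theorem pvEvens_cons {α : Type} (x : α) (m : List α) : pvEvens (x :: m) = x :: pvEvens m.tail := by
  cases m <;> simp [pvEvens]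

theorem pvZipPairs {α : Type} : ∀ (l : List α), (pvEvens l).zip (pvEvens l.tail) = pvPairs l := by
  intro l
  induction l using pvPairs.induct with
  | case1 a b t ih =>
    simp only [pvEvens, List.tail_cons, pvEvens_cons, List.zip_cons_cons, pvPairs]
    rw [ih]
  | case2 l h =>
    cases l with
    | nil => simp [pvEvens, pvPairs]
    | cons a t =>
      cases t with
      | nil => simp [pvEvens, pvPairs]
      | cons b t' => exact absurd rfl (h a b t')

theorem pvPairsMap {α β : Type} (f : α → β) : ∀ (l : List α),
    pvPairs (l.map f) = (pvPairs l).map (fun p => (f p.1, f p.2)) := by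
  intro l
  induction l using pvPairs.induct with
  | case1 a b t ih => simp [pvPairs, ih]
  | case2 l h =>
    cases l with
    | nil => simp [pvPairs]
    | cons a t =>
      cases t with
      | nil => simp [pvPairs]
      | cons b t' => exact absurd rfl (h a b t')

-- ===== VERDICT =====
theorem min_of_pairs_spec : Claim_equal_min_of_pairs := by
  intro number _ _
  unfold Spec_min_of_pairs min_of_pairs min_of_pairs_alt
  have h := pvLoop number.toList 0 [] none none
  simp only [Nat.mul_zero, Nat.cast_zero, List.nil_append] at h
  simp only [pvSliceEvens, pvSliceOdds, Option.getD_some, pvZipPairs, pvPairsMap, h,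
    List.map_map]
  rfl
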